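-- pv_equiv track=rewrite | github.com/rickyota/genoboost-paper-script | paper-script/projects_py/boosting/main/paper.py | get_withcovs
-- ===== SOURCE A (Python) =====
-- def get_withcovs(max_on, plot_on=None,
--                  withcov_only=False, nocov_only=False,
--                  ):
--     # since sometimes needs
--     # [(F,F), (F,T), (T,T)]
--     # especially for auc
--     #
--     #
--     # if maxon=nagel and ploton=nagel
--     # [(T,T)]
--     #
--     # if maxon=nagel
--     # [(F,T),(T,T)]
--     #
--     # if ploton=nagel
--     # [(T,F),(T,T)]
--     #
--     # else
--     # [(F,F),(F,T),(T,F),(T,T)]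
--
--     # (withcov, withcov_at_maxon)
--
--     if max_on == 'nagelkerke' and plot_on == 'nagelkerke':
--         # nocovs_and_maxon=[(True, True),(True, False)]
--         withcovs = [(True, True)]
--         # return [(True, True)]
--
--     elif max_on == 'nagelkerke':
--         withcovs = [(False, True), (True, True)]
--         # return [(False, True), (True, True)]
--
--     elif plot_on == 'nagelkerke':
--         withcovs = [(True, False), (True, True)]
--
--     else:
--         withcovs = [(False, False), (False, True), (True, False), (True, True)]
--
--     if withcov_only and nocov_only:
--         raise RuntimeError('Wrong arg')
--     elif withcov_only:
--         return [x for x in withcovs if x[0]]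
--     elif nocov_only:
--         return [x for x in withcovs if not x[0]]
--     else:
--         return withcovs
-- ===== SOURCE B (Python) =====
-- def get_withcovs(max_on, plot_on=None,
--                  withcov_only=False, nocov_only=False,
--                  ):
--     if withcov_only and nocov_only:
--         raise RuntimeError('Wrong arg')
--     # Bitmask over codes k = 2*withcov + withcov_at_maxon (bit k set = pair kept).
--     mask = 0b1111
--     if max_on == 'nagelkerke':
--         mask &= 0b1010  # keep only withcov_at_maxon=True (codes 1,3)
--     if plot_on == 'nagelkerke':
--         mask &= 0b1100  # keep only withcov=True (codes 2,3)
--     if withcov_only: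
--         mask &= 0b1100
--     if nocov_only:
--         mask &= 0b0011
--     return [(k >> 1 & 1 == 1, k & 1 == 1) for k in range(4) if mask >> k & 1]
-- ===== Notes on version B (the rewrite author's own statement) =====
-- stated objective: alternative
-- what changed: Replaces A's explicit four-way enumeration of literal tuple lists plus a list-comprehension post-filter with a 4-bit bitmask: each pair is a code k=2*a+b, every condition (max_on, plot_on, withcov_only, nocov_only) becomes a bitwise AND with a fixed mask, and the result list is decoded from the surviving bits in code order; Pre_ excludes only the case where both flags are set, on which both A and B raise RuntimeError.
import Mathlib
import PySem

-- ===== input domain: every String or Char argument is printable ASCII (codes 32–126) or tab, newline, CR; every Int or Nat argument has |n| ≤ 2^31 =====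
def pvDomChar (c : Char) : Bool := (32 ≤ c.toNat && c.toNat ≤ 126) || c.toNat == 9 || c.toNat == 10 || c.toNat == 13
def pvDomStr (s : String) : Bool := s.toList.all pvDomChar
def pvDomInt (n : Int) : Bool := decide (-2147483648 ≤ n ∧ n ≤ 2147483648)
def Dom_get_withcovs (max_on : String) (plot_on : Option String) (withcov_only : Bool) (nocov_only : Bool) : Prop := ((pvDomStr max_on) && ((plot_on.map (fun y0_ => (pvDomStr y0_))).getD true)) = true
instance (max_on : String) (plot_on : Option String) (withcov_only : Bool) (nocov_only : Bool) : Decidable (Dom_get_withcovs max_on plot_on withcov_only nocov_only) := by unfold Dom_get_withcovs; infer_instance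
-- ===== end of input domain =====

-- B replaces A's four-way case enumeration + post-filter with a 4-bit bitmask
-- (code k = 2*withcov + withcov_at_maxon) ANDed per condition and decoded once.
-- ===== PORT A =====
def get_withcovs (max_on : String) (plot_on : Option String) (withcov_only : Bool) (nocov_only : Bool) : List (Bool × Bool) :=
  let withcovs : List (Bool × Bool) :=
    if max_on = "nagelkerke" ∧ plot_on = some "nagelkerke" then
      [(true, true)]
    else if max_on = "nagelkerke" then
      [(false, true), (true, true)]
    else if plot_on = some "nagelkerke" then
      [(true, false), (true, true)]
    else
      [(false, false), (false, true), (true, false), (true, true)]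
  if withcov_only && nocov_only then
    []  -- Python raises RuntimeError here; excluded by Pre_get_withcovs
  else if withcov_only then
    withcovs.filter (fun x => x.1)
  else if nocov_only then
    withcovs.filter (fun x => !x.1)
  else
    withcovs

-- ===== PORT B =====
def get_withcovs_alt (max_on : String) (plot_on : Option String) (withcov_only : Bool) (nocov_only : Bool) : List (Bool × Bool) :=
  if withcov_only && nocov_only then
    []  -- Python raises RuntimeError here; excluded by Pre_get_withcovs
  else
    let mask0 : Nat := 0b1111
    let mask1 : Nat := if max_on = "nagelkerke" then mask0 &&& 0b1010 else mask0
    let mask2 : Nat := if plot_on = some "nagelkerke" then mask1 &&& 0b1100 else mask1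
    let mask3 : Nat := if withcov_only then mask2 &&& 0b1100 else mask2
    let mask : Nat := if nocov_only then mask3 &&& 0b0011 else mask3
    ((List.range 4).filter (fun k => (mask >>> k) &&& 1 ≠ 0)).map
      (fun k => (decide ((k >>> 1) &&& 1 = 1), decide (k &&& 1 = 1)))

-- ===== PRECONDITION & SPEC =====
-- Pre_ excludes only the inputs where A raises RuntimeError (both flags set).
def Pre_get_withcovs (max_on : String) (plot_on : Option String) (withcov_only : Bool) (nocov_only : Bool) : Prop :=
  ¬ (withcov_only = true ∧ nocov_only = true)
instance (max_on : String) (plot_on : Option String) (withcov_only : Bool) (nocov_only : Bool) : Decidable (Pre_get_withcovs max_on plot_on withcov_only nocov_only) := by unfold Pre_get_withcovs; infer_instance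
def pvWitness_get_withcovs : String × Option String × Bool × Bool := ("nagelkerke", some "auc", true, false)
def Spec_get_withcovs (max_on : String) (plot_on : Option String) (withcov_only : Bool) (nocov_only : Bool) (out : List (Bool × Bool)) : Prop := out = get_withcovs_alt max_on plot_on withcov_only nocov_only
instance (max_on : String) (plot_on : Option String) (withcov_only : Bool) (nocov_only : Bool) (out : List (Bool × Bool)) : Decidable (Spec_get_withcovs max_on plot_on withcov_only nocov_only out) := by unfold Spec_get_withcovs; infer_instance

-- ===== CLAIM (what is proved, stated in full; the proofs are below) =====
def Claim_equal_get_withcovs : Prop := ∀ (max_on : String) (plot_on : Option String) (withcov_only : Bool) (nocov_only : Bool), Dom_get_withcovs max_on plot_on withcov_only nocov_only → Pre_get_withcovs max_on plot_on withcov_only nocov_only → Spec_get_withcovs max_on plot_on withcov_only nocov_only (get_withcovs max_on plot_on withcov_only nocov_only)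

-- ===== LEMMAS AND PROOFS =====

-- ===== VERDICT (by name: the statement is the Claim_ definition above) =====
theorem get_withcovs_spec : Claim_equal_get_withcovs := by
  intro max_on plot_on w n _ hpre
  unfold Spec_get_withcovs get_withcovs get_withcovs_alt
  unfold Pre_get_withcovs at hpre
  by_cases h1 : max_on = "nagelkerke" <;>
    by_cases h2 : plot_on = some "nagelkerke" <;>
      cases w <;> cases n <;>
        simp_all <;> decide
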